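-- pv_equiv track=rewrite | github.com/miliar/Code_Jam_Webscraper | solutions_python/Problem_155/1349.py | solveShyness
-- ===== SOURCE A (Python) =====
-- def solveShyness(maxShyness, shyness):
-- 	answer = 0
-- 	total = 0
-- 	for i, s in enumerate(shyness):
-- 		if i>total :
-- 			a = i-total
-- 			answer = max(answer, a)
-- 		total += s
-- 	return answer
-- ===== SOURCE B (Python) =====
-- def solveShyness(maxShyness, shyness):
--     # answer = max prefix sum of the transformed sequence (1 - s), last element irrelevant;
--     # computed back-to-front via best = max(0, (1 - s) + best).
--     best = 0
--     for s in reversed(shyness[:-1]):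
--         best = max(0, (1 - s) + best)
--     return best
-- ===== Notes on version B (the rewrite author's own statement) =====
-- stated objective: alternative
-- what changed: A tracks a running total and index forward, maximising i-total; B uses the identity i-prefix[i] = sum of (1-s_j) for j<i, drops the irrelevant last element, and computes the maximum prefix sum of the transformed values by a backward scan with the recurrence best = max(0, (1-s)+best) -- no index, no running total, no prefix table.
import Mathlib
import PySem

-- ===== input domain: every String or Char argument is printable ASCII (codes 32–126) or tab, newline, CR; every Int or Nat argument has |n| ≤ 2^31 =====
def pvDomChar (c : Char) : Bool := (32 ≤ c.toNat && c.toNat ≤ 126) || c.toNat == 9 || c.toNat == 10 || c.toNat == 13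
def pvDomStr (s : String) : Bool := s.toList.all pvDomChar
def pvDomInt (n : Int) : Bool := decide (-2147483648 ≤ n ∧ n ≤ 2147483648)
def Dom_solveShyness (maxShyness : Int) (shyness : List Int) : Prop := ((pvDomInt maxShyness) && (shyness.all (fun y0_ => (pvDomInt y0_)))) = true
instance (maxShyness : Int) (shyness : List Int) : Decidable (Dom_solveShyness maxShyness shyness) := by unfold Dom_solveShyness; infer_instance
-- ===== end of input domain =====

-- B replaces A's forward index/running-total loop by a backward max-prefix-sum
-- recurrence on the transformed values 1 - s (objective: alternative, same cost).

-- ===== PORT A =====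
-- one loop over enumerate(shyness), state (answer, total)
def solveShyness (maxShyness : Int) (shyness : List Int) : Int :=
  ((PySem.List.enumerate shyness 0).foldl
    (fun (st : Int × Int) (p : Int × Int) =>
      let answer := if p.1 > st.2 then max st.1 (p.1 - st.2) else st.1
      (answer, st.2 + p.2)) (0, 0)).1

-- ===== PORT B =====
-- Source B: best = 0; for s in reversed(shyness[:-1]): best = max(0, (1 - s) + best)
def solveShyness_alt (maxShyness : Int) (shyness : List Int) : Int :=
  (PySem.List.slice shyness none (some (-1))).reverse.foldl
    (fun best s => max 0 (1 - s + best)) 0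

-- ===== PRECONDITION & SPEC =====
def Spec_solveShyness (maxShyness : Int) (shyness : List Int) (out : Int) : Prop := out = solveShyness_alt maxShyness shyness
instance (maxShyness : Int) (shyness : List Int) (out : Int) : Decidable (Spec_solveShyness maxShyness shyness out) := by unfold Spec_solveShyness; infer_instance

-- ===== CLAIM (what is proved, stated in full; the proofs are below) =====
def Claim_equal_solveShyness : Prop := ∀ (maxShyness : Int) (shyness : List Int), Dom_solveShyness maxShyness shyness → Spec_solveShyness maxShyness shyness (solveShyness maxShyness shyness)

-- ===== LEMMAS AND PROOFS =====

-- characterisation of A's loop: best remaining answer when (total - index) = c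
def pvBest : List Int → Int → Int
  | [], _ => 0
  | s :: r, c => max (max 0 (-c)) (pvBest r (c + s - 1))

theorem pvBest_nonneg (l : List Int) (c : Int) : 0 ≤ pvBest l c := by
  induction l generalizing c with
  | nil => simp [pvBest]
  | cons s r ih =>
    simp only [pvBest]
    exact le_trans (le_max_left 0 (-c)) (le_max_left _ _)

theorem pvAfold (l : List Int) (k ans t : Int) (h : 0 ≤ ans) :
    ((PySem.List.enumerate l k).foldl
      (fun (st : Int × Int) (p : Int × Int) =>
        let answer := if p.1 > st.2 then max st.1 (p.1 - st.2) else st.1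
        (answer, st.2 + p.2)) (ans, t)).1 = max ans (pvBest l (t - k)) := by
  induction l generalizing k ans t with
  | nil =>
    simp [PySem.List.enumerate_nil, pvBest]
    omega
  | cons s r ih =>
    rw [PySem.List.enumerate_cons]
    simp only [List.foldl_cons]
    have hans' : (0:Int) ≤ (if k > t then max ans (k - t) else ans) := by
      split_ifs <;> [exact le_trans h (le_max_left _ _); exact h]
    rw [ih (k + 1) _ (t + s) hans']
    have harg : t + s - (k + 1) = (t - k) + s - 1 := by ring
    rw [harg]
    simp only [pvBest]
    have hB := pvBest_nonneg r ((t - k) + s - 1)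
    simp only [max_def]
    split_ifs <;> omega

-- B's backward scan as a foldr (reversed-loop = foldr)
def pvH (l : List Int) : Int := l.foldr (fun s best => max 0 (1 - s + best)) 0

theorem pvH_nonneg (l : List Int) : 0 ≤ pvH l := by
  cases l <;> simp [pvH]

-- link: A's remaining-best equals max 0 (pvH l.dropLast - c) for nonempty l
theorem pvBest_eq_pvH (l : List Int) (c : Int) (hne : l ≠ []) :
    pvBest l c = max 0 (pvH l.dropLast - c) := by
  induction l generalizing c with
  | nil => exact absurd rfl hne
  | cons s r ih =>
    cases r with
    | nil => simp [pvBest, pvH]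
    | cons s' r' =>
      have h := ih (c + s - 1) (by simp)
      rw [show pvBest (s :: s' :: r') c
            = max (max 0 (-c)) (pvBest (s' :: r') (c + s - 1)) from rfl, h,
          List.dropLast_cons_of_ne_nil (by simp : s' :: r' ≠ ([]:List Int)),
          show pvH (s :: (s' :: r').dropLast)
            = max 0 (1 - s + pvH (s' :: r').dropLast) from rfl]
      have hH := pvH_nonneg ((s' :: r').dropLast)
      simp only [max_def]
      split_ifs <;> omega

-- ===== VERDICT (by name: the statement is the Claim_ definition above) =====
theorem solveShyness_spec : Claim_equal_solveShyness := by
  intro maxShyness shyness _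
  show solveShyness maxShyness shyness = solveShyness_alt maxShyness shyness
  unfold solveShyness solveShyness_alt
  rw [pvAfold shyness 0 0 0 le_rfl]
  simp only [PySem.List.slice_to_neg_one, List.foldl_reverse, sub_zero]
  cases shyness with
  | nil => simp [pvBest]
  | cons s r =>
    rw [pvBest_eq_pvH (s :: r) 0 (by simp)]
    have h := pvH_nonneg ((s :: r).dropLast)
    show max 0 (max 0 (pvH ((s :: r).dropLast) - 0)) = pvH ((s :: r).dropLast)
    simp only [max_def]
    split_ifs <;> omega
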